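-- pv_equiv track=rewrite | github.com/AidilRiski/Tubes-Algeo-02 | src/shear.py | shear_3d_y
-- ===== SOURCE A (Python) =====
-- def shear_3d_y(points, factor_k):
--     transformation_matrix = [
--         [1, factor_k, 0],
--         [0, 1, 0],
--         [0, factor_k, 1]
--     ]
--
--     newPoints = []
--
--     for point in points:
--         newPoint = []
--         for tmE in transformation_matrix:
--             sum = 0
--             for tmEVI, tmEVV in enumerate(tmE):
--                 sum += tmEVV * point[tmEVI]
--             newPoint.append(sum)
--         newPoints.append(newPoint)
--
--     return newPoints
-- ===== SOURCE B (Python) =====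
-- def shear_3d_y(points, factor_k):
--     return [[p[0] + factor_k * p[1], p[1], factor_k * p[1] + p[2]]
--             for p in points]
-- ===== Notes on version B (the rewrite author's own statement) =====
-- stated objective: simpler
-- what changed: Replaces the triple-nested matrix-vector multiplication over a fixed 3x3 shear matrix with the closed-form per-point formula in a single list comprehension.
import Mathlib
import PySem

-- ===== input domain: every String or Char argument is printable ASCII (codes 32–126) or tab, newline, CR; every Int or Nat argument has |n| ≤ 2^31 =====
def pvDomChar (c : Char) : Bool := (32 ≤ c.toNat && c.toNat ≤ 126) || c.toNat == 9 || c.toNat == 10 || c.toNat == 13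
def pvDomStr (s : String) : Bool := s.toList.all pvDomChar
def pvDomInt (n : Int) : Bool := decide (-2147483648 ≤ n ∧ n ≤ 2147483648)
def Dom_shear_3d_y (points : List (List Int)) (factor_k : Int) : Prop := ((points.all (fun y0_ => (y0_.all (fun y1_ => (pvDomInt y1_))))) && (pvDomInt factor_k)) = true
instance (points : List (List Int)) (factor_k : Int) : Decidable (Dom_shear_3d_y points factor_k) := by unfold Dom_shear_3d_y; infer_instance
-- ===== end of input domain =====

-- B computes the fixed y-shear in closed form per point instead of multiplying by a 3x3 matrix (simpler).
-- ===== PORT A =====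
def shear_3d_y (points : List (List Int)) (factor_k : Int) : List (List Int) :=
  let transformation_matrix : List (List Int) :=
    [[1, factor_k, 0], [0, 1, 0], [0, factor_k, 1]]
  points.foldl (fun newPoints point =>
    newPoints ++ [transformation_matrix.foldl (fun newPoint tmE =>
      newPoint ++ [(PySem.List.enumerate tmE).foldl
        (fun s iv => s + iv.2 * PySem.List.pyGetD point iv.1 0) 0]) []]) []

-- ===== PORT B =====
def shear_3d_y_alt (points : List (List Int)) (factor_k : Int) : List (List Int) :=
  points.map (fun p =>
    [PySem.List.pyGetD p 0 0 + factor_k * PySem.List.pyGetD p 1 0,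
     PySem.List.pyGetD p 1 0,
     factor_k * PySem.List.pyGetD p 1 0 + PySem.List.pyGetD p 2 0])

-- ===== PRECONDITION & SPEC =====
-- Pre_ excludes exactly the inputs where A raises IndexError: a point with fewer than 3 coordinates.
def Pre_shear_3d_y (points : List (List Int)) (factor_k : Int) : Prop :=
  ∀ p ∈ points, 3 ≤ p.length
instance (points : List (List Int)) (factor_k : Int) : Decidable (Pre_shear_3d_y points factor_k) := by
  unfold Pre_shear_3d_y; infer_instance
def pvWitness_shear_3d_y : List (List Int) × Int := ([[1, 2, 3], [0, -1, 4]], 5)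

def Spec_shear_3d_y (points : List (List Int)) (factor_k : Int) (out : List (List Int)) : Prop := out = shear_3d_y_alt points factor_k
instance (points : List (List Int)) (factor_k : Int) (out : List (List Int)) : Decidable (Spec_shear_3d_y points factor_k out) := by unfold Spec_shear_3d_y; infer_instance

-- ===== CLAIM (what is proved, stated in full; the proofs are below) =====
def Claim_equal_shear_3d_y : Prop := ∀ (points : List (List Int)) (factor_k : Int), Dom_shear_3d_y points factor_k → Pre_shear_3d_y points factor_k → Spec_shear_3d_y points factor_k (shear_3d_y points factor_k)

-- ===== LEMMAS AND PROOFS =====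
theorem shear_point_eq (p : List Int) (k : Int) (h : 3 ≤ p.length) :
    ([[1, k, 0], [0, 1, 0], [0, k, 1]] : List (List Int)).foldl (fun newPoint tmE =>
      newPoint ++ [(PySem.List.enumerate tmE).foldl
        (fun s iv => s + iv.2 * PySem.List.pyGetD p iv.1 0) 0]) []
    = [PySem.List.pyGetD p 0 0 + k * PySem.List.pyGetD p 1 0,
       PySem.List.pyGetD p 1 0,
       k * PySem.List.pyGetD p 1 0 + PySem.List.pyGetD p 2 0] := by
  match p, h with
  | a :: b :: c :: t, _ =>
    simp [PySem.List.enumerate, PySem.List.pyGetD, PySem.List.pyGet?, PySem.List.pyIdx?]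

-- ===== VERDICT (by name: the statement is the Claim_ definition above) =====
theorem shear_3d_y_spec : Claim_equal_shear_3d_y := by
  intro points factor_k _ hpre
  unfold Spec_shear_3d_y shear_3d_y shear_3d_y_alt
  rw [PySem.List.foldl_append_singleton_eq_map]
  exact List.map_congr_left (fun p hp => shear_point_eq p factor_k (hpre p hp))
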